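-- pv_equiv track=rewrite | github.com/carlmcneil-ops/weatherbrain | caravan_text.py | _compress_tow
-- ===== SOURCE A (Python) =====
-- from typing import Dict, Any, List
--
-- def _compress_tow(bits: List[str]) -> str:
--     """
--     Pick the 'worst' towing line so we don't list every variant.
--     """
--     if not bits:
--         return "Towing looks easy the whole route."
--
--     # Rank: severe > moderate > light
--     severe: List[str] = []
--     moderate: List[str] = []
--     light: List[str] = []
--
--     for n in bits:
--         l = n.lower()
--         if "strong winds" in l or "severe" in l:
--             severe.append(n)
--         elif "moderate winds" in l or "noticeable" in l:
--             moderate.append(n)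
--         elif "light winds" in l or "mild" in l:
--             light.append(n)
--         else:
--             moderate.append(n)
--
--     if severe:
--         return " / ".join(sorted(set(severe)))
--     if moderate:
--         return " / ".join(sorted(set(moderate)))
--     if light:
--         return " / ".join(sorted(set(light)))
--
--     return "Towing looks easy the whole route."
-- ===== SOURCE B (Python) =====
-- from typing import List
--
--
-- def _tow_rank(n: str) -> int:
--     l = n.lower()
--     if "strong winds" in l or "severe" in l:
--         return 0
--     if "moderate winds" in l or "noticeable" in l:
--         return 1
--     if "light winds" in l or "mild" in l:
--         return 2
--     return 1
--
--
-- def _compress_tow(bits: List[str]) -> str: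
--     """
--     Pick the 'worst' towing line so we don't list every variant.
--     """
--     if not bits:
--         return "Towing looks easy the whole route."
--     ranks = [_tow_rank(n) for n in bits]
--     m = min(ranks)
--     return " / ".join(sorted({n for n, r in zip(bits, ranks) if r == m}))
-- ===== Notes on version B (the rewrite author's own statement) =====
-- stated objective: simpler
-- what changed: Replaces the three explicit severity buckets and the first-nonempty if-chain by a numeric rank helper plus min/filter: rank every line, take the minimum rank present, and join the sorted set of lines at that rank.
import Mathlib
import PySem

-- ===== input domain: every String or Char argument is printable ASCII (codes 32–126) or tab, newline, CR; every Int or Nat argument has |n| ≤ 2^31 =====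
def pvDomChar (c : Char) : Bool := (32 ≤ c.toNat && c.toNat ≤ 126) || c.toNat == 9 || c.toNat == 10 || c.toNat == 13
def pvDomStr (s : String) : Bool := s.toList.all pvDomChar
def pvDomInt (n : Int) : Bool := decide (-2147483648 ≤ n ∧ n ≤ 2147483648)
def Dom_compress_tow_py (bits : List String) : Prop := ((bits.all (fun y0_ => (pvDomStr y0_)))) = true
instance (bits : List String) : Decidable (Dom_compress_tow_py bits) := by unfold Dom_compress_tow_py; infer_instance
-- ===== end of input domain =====

-- B replaces A's three severity buckets + first-nonempty chain by a rank helper with min/filter (objective: simpler).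


-- ===== PORT A =====
-- one loop iteration of A: classify n into (severe, moderate, light)
def towStepA (acc : List String × List String × List String) (n : String) :
    List String × List String × List String :=
  if PySem.Str.isIn "strong winds" (PySem.Str.lower n) || PySem.Str.isIn "severe" (PySem.Str.lower n) then
    (acc.1 ++ [n], acc.2.1, acc.2.2)
  else if PySem.Str.isIn "moderate winds" (PySem.Str.lower n) || PySem.Str.isIn "noticeable" (PySem.Str.lower n) then
    (acc.1, acc.2.1 ++ [n], acc.2.2)
  else if PySem.Str.isIn "light winds" (PySem.Str.lower n) || PySem.Str.isIn "mild" (PySem.Str.lower n) then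
    (acc.1, acc.2.1, acc.2.2 ++ [n])
  else
    (acc.1, acc.2.1 ++ [n], acc.2.2)

def compress_tow_py (bits : List String) : String :=
  if bits = [] then "Towing looks easy the whole route."
  else
    let st := bits.foldl towStepA ([], [], [])
    if st.1 ≠ [] then
      PySem.Str.join " / " (PySem.List.sorted (PySem.Set.ofList st.1) (fun x => x) false)
    else if st.2.1 ≠ [] then
      PySem.Str.join " / " (PySem.List.sorted (PySem.Set.ofList st.2.1) (fun x => x) false)
    else if st.2.2 ≠ [] then
      PySem.Str.join " / " (PySem.List.sorted (PySem.Set.ofList st.2.2) (fun x => x) false)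
    else "Towing looks easy the whole route."

-- ===== PORT B =====
def towRank (n : String) : Int :=
  if PySem.Str.isIn "strong winds" (PySem.Str.lower n) || PySem.Str.isIn "severe" (PySem.Str.lower n) then 0
  else if PySem.Str.isIn "moderate winds" (PySem.Str.lower n) || PySem.Str.isIn "noticeable" (PySem.Str.lower n) then 1
  else if PySem.Str.isIn "light winds" (PySem.Str.lower n) || PySem.Str.isIn "mild" (PySem.Str.lower n) then 2
  else 1

def compress_tow_py_alt (bits : List String) : String :=
  if bits = [] then "Towing looks easy the whole route."
  else
    let ranks := bits.map towRank
    -- min(ranks): ranks is nonempty here, so min? is some; getD makes the port total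
    let m := (PySem.List.min? ranks (fun x => x)).getD 0
    PySem.Str.join " / " (PySem.List.sorted
      (PySem.Set.ofList (((bits.zip ranks).filter (fun p => p.2 == m)).map Prod.fst))
      (fun x => x) false)

-- ===== PRECONDITION & SPEC =====
def Spec_compress_tow_py (bits : List String) (out : String) : Prop := out = compress_tow_py_alt bits
instance (bits : List String) (out : String) : Decidable (Spec_compress_tow_py bits out) := by unfold Spec_compress_tow_py; infer_instance

-- ===== CLAIM (what is proved, stated in full; the proofs are below) =====
def Claim_equal_compress_tow_py : Prop := ∀ (bits : List String), Dom_compress_tow_py bits → Spec_compress_tow_py bits (compress_tow_py bits)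

-- ===== LEMMAS AND PROOFS =====

lemma towRank_cases (n : String) : towRank n = 0 ∨ towRank n = 1 ∨ towRank n = 2 := by
  unfold towRank
  split_ifs <;> simp

-- one A-step, phrased through B's rank helper
lemma towStepA_rank (acc : List String × List String × List String) (b : String) :
    towStepA acc b =
      if towRank b == 0 then (acc.1 ++ [b], acc.2.1, acc.2.2)
      else if towRank b == 1 then (acc.1, acc.2.1 ++ [b], acc.2.2)
      else (acc.1, acc.2.1, acc.2.2 ++ [b]) := by
  unfold towStepA towRank
  split_ifs <;> simp_all

-- A's fold produces exactly the three rank-filtered sublists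
lemma foldA_eq (bits : List String) (s mo li : List String) :
    bits.foldl towStepA (s, mo, li) =
      (s ++ bits.filter (fun n => towRank n == 0),
       mo ++ bits.filter (fun n => towRank n == 1),
       li ++ bits.filter (fun n => towRank n == 2)) := by
  induction bits generalizing s mo li with
  | nil => simp
  | cons b t ih =>
    rw [List.foldl_cons, towStepA_rank]
    rcases towRank_cases b with h | h | h <;>
      simp [h, ih]

-- B's zip/filter/map comprehension is a plain filter by rank
lemma zip_filter_eq (bits : List String) (m : Int) :
    (((bits.zip (bits.map towRank)).filter (fun p => p.2 == m)).map Prod.fst) =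
      bits.filter (fun n => towRank n == m) := by
  induction bits with
  | nil => rfl
  | cons b t ih =>
    simp only [List.map_cons, List.zip_cons_cons, List.filter_cons]
    by_cases h : towRank b = m <;> simp [h, ih]

theorem compress_tow_py_spec : Claim_equal_compress_tow_py := by
  intro bits _
  unfold Spec_compress_tow_py compress_tow_py compress_tow_py_alt
  by_cases hnil : bits = []
  · simp [hnil]
  · simp only [hnil, ite_false]
    rw [foldA_eq]
    simp only [List.nil_append]
    -- properties of m := min of ranks
    obtain ⟨m, hm⟩ : ∃ m, PySem.List.min? (bits.map towRank) (fun x => x) = some m := by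
      rcases Option.eq_none_or_eq_some (PySem.List.min? (bits.map towRank) (fun x => x)) with h | h
      · rw [PySem.List.min?_eq_none_iff] at h
        simp [hnil] at h
      · exact h
    have hmem : m ∈ bits.map towRank := PySem.List.min?_mem hm
    have hmin : ∀ y ∈ bits.map towRank, m ≤ y := by
      intro y hy; exact PySem.List.min?_isMin hm y hy
    obtain ⟨x, hx, hxm⟩ := List.mem_map.1 hmem
    have hm0 : 0 ≤ m := by
      rcases towRank_cases x with h | h | h <;> omega
    rw [hm, Option.getD_some, zip_filter_eq]
    by_cases h0 : bits.filter (fun n => towRank n == 0) = []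
    · by_cases h1 : bits.filter (fun n => towRank n == 1) = []
      · by_cases h2 : bits.filter (fun n => towRank n == 2) = []
        · exfalso
          rcases List.exists_mem_of_ne_nil bits hnil with ⟨b, hb⟩
          rcases towRank_cases b with h | h | h
          · exact (List.filter_eq_nil_iff.1 h0) b hb (by simp [h])
          · exact (List.filter_eq_nil_iff.1 h1) b hb (by simp [h])
          · exact (List.filter_eq_nil_iff.1 h2) b hb (by simp [h])
        · -- all ranks are 2, so m = 2
          have hall : ∀ n ∈ bits, towRank n = 2 := by
            intro n hn
            rcases towRank_cases n with h | h | h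
            · exact absurd (by simp [h]) ((List.filter_eq_nil_iff.1 h0) n hn |> fun a => a)
            · exact absurd (by simp [h]) ((List.filter_eq_nil_iff.1 h1) n hn |> fun a => a)
            · exact h
          have hm2 : m = 2 := by rw [← hxm]; exact hall x hx
          simp [h0, h1, h2, hm2]
      · -- no rank 0, some rank 1, so m = 1
        have hge : (1 : Int) ≤ m := by
          rw [← hxm]
          rcases towRank_cases x with h | h | h
          · exact absurd (by simp [h]) ((List.filter_eq_nil_iff.1 h0) x hx |> fun a => a)
          · omega
          · omega
        obtain ⟨y, hy, hy1⟩ : ∃ y ∈ bits, towRank y = 1 := by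
          rcases List.exists_mem_of_ne_nil _ h1 with ⟨y, hy⟩
          rw [List.mem_filter] at hy
          exact ⟨y, hy.1, by simpa using hy.2⟩
        have hle : m ≤ 1 := by
          have := hmin (towRank y) (List.mem_map.2 ⟨y, hy, rfl⟩)
          omega
        have hm1 : m = 1 := le_antisymm hle hge
        simp [h0, h1, hm1]
    · -- some rank 0, so m = 0
      obtain ⟨y, hy, hy0⟩ : ∃ y ∈ bits, towRank y = 0 := by
        rcases List.exists_mem_of_ne_nil _ h0 with ⟨y, hy⟩
        rw [List.mem_filter] at hy
        exact ⟨y, hy.1, by simpa using hy.2⟩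
      have hle : m ≤ 0 := by
        have := hmin (towRank y) (List.mem_map.2 ⟨y, hy, rfl⟩)
        omega
      have hm0' : m = 0 := le_antisymm hle hm0
      simp [h0, hm0']
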